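-- pv_equiv track=rewrite | github.com/ToanChoaa/CaroGame | Game.py | get_move_explanation
-- ===== SOURCE A (Python) =====
-- PLAYER_PIECE = 1
--
-- AI_PIECE = 2
--
-- EMPTY = 0
--
-- WIN_COUNT = 3
--
-- def drop_piece(board, row, col, piece):
--     board[row][col] = piece
--
-- def get_valid_locations(board):
--     valid_locations = []
--     for r in range(len(board)):
--         for c in range(len(board[0])):
--             if board[r][c] == EMPTY:
--                 valid_locations.append((r, c))
--     return valid_locations
--
-- def winning_move(board, piece):
--     rows = len(board)
--     cols = len(board[0])
--
--     # Kiểm tra hàng ngang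
--     for r in range(rows):
--         for c in range(cols - WIN_COUNT + 1):
--             if all(board[r][c + i] == piece for i in range(WIN_COUNT)):
--                 return True
--
--     # Kiểm tra hàng dọc
--     for c in range(cols):
--         for r in range(rows - WIN_COUNT + 1):
--             if all(board[r + i][c] == piece for i in range(WIN_COUNT)):
--                 return True
--
--     # Kiểm tra đường chéo chính (từ trái trên xuống phải dưới)
--     for r in range(rows - WIN_COUNT + 1):
--         for c in range(cols - WIN_COUNT + 1):
--             if all(board[r + i][c + i] == piece for i in range(WIN_COUNT)):
--                 return True
--
--     # Kiểm tra đường chéo phụ (từ phải trên xuống trái dưới)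
--     for r in range(rows - WIN_COUNT + 1):
--         for c in range(WIN_COUNT - 1, cols):
--             if all(board[r + i][c - i] == piece for i in range(WIN_COUNT)):
--                 return True
--
--     return False
--
-- def get_move_explanation(board, move, piece):
--     r, c = move
--     opp_piece = AI_PIECE if piece == PLAYER_PIECE else PLAYER_PIECE
--     rows, cols = len(board), len(board[0])
--
--     # Check for immediate win
--     for row, col in get_valid_locations(board):
--         board_copy = [row_data[:] for row_data in board]
--         drop_piece(board_copy, row, col, piece)
--         if winning_move(board_copy, piece):
--             if (row, col) == (r, c):
--                 return "(Nước đi chiến thắng!)"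
--
--     # Check for blocking opponent
--     for row, col in get_valid_locations(board):
--         board_copy = [row_data[:] for row_data in board]
--         drop_piece(board_copy, row, col, opp_piece)
--         if winning_move(board_copy, opp_piece):
--             if (row, col) == (r, c):
--                 return "(Chặn nước đi nguy hiểm của đối thủ)"
--
--     # Center preference
--     center_r, center_c = rows // 2, cols // 2
--     if (r, c) == (center_r, center_c):
--         return "(Ô trung tâm - vị trí tốt nhất)"
--
--     # Corner preference
--     corners = [(0, 0), (0, cols - 1), (rows - 1, 0), (rows - 1, cols - 1)]
--     if (r, c) in corners:
--         return "(Ô góc - vị trí chiến lược)"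
--
--     return "(Nước đi thông minh)"
-- ===== SOURCE B (Python) =====
-- PLAYER_PIECE = 1
-- AI_PIECE = 2
-- EMPTY = 0
-- WIN_COUNT = 3
--
-- DIRS = ((0, 1), (1, 0), (1, 1), (1, -1))
--
-- def _has_line(board, piece, rows, cols):
--     # single generic scan: every cell x every direction vector
--     for rr in range(rows):
--         for cc in range(cols):
--             for dr, dc in DIRS:
--                 er, ec = rr + (WIN_COUNT - 1) * dr, cc + (WIN_COUNT - 1) * dc
--                 if 0 <= er < rows and 0 <= ec < cols and \
--                    all(board[rr + i * dr][cc + i * dc] == piece for i in range(WIN_COUNT)):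
--                     return True
--     return False
--
-- def get_move_explanation(board, move, piece):
--     r, c = move
--     opp_piece = AI_PIECE if piece == PLAYER_PIECE else PLAYER_PIECE
--     rows, cols = len(board), len(board[0])
--
--     # only the target cell itself can trigger the win/block answers
--     if 0 <= r < rows and 0 <= c < cols and board[r][c] == EMPTY:
--         placed = [row[:] for row in board]
--         placed[r][c] = piece
--         if _has_line(placed, piece, rows, cols):
--             return "(Nước đi chiến thắng!)"
--         placed[r][c] = opp_piece
--         if _has_line(placed, opp_piece, rows, cols):
--             return "(Chặn nước đi nguy hiểm của đối thủ)"
--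
--     if (r, c) == (rows // 2, cols // 2):
--         return "(Ô trung tâm - vị trí tốt nhất)"
--     if (r, c) in ((0, 0), (0, cols - 1), (rows - 1, 0), (rows - 1, cols - 1)):
--         return "(Ô góc - vị trí chiến lược)"
--     return "(Nước đi thông minh)"
-- ===== Notes on version B (the rewrite author's own statement) =====
-- stated objective: faster
-- what changed: B drops A's outer scan over every empty cell (each followed by a full-board win test) and tests only the target cell (r,c), replacing A's four separate direction loops by one generic cell-by-direction-vector line scan; only the move cell can trigger A's early returns, so the results coincide.
import Mathlib
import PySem

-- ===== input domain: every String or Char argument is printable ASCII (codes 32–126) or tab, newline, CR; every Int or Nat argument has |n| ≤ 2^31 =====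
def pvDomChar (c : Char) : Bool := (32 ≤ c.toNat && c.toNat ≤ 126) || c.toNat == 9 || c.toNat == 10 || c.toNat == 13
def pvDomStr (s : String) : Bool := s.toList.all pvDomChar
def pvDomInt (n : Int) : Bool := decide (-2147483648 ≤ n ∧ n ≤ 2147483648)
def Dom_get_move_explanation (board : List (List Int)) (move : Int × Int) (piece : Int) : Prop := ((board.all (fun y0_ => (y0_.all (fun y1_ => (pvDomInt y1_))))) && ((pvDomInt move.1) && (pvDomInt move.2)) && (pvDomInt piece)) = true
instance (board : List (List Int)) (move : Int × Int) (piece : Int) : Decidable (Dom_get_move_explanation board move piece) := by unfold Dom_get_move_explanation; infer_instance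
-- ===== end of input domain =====

-- B replaces A's scan over ALL empty cells (each with a full-board win test) by a direct
-- test of the target cell only, with one generic direction-vector line scan (faster, asymptotic).

-- ===== PORT A =====

-- board[x][y] (two chained Python indexings; none = IndexError, excluded by Pre_)
def pvGetCell (b : List (List Int)) (r c : Int) : Option Int :=
  (PySem.List.pyGet? b r).bind (fun row => PySem.List.pyGet? row c)

-- board_copy = [row[:] for row in board]; board_copy[row][col] = piece
-- (pure rendering of copy-then-assign at nonnegative in-range indices, as both Pythons do)
def pvSetCell (b : List (List Int)) (row col piece : Int) : List (List Int) :=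
  b.mapIdx (fun i rd => if (i : Int) = row then rd.mapIdx (fun j v => if (j : Int) = col then piece else v) else rd)

-- get_valid_locations: nested append loop rendered as flatMap/filter/map
def pvValidLocations (board : List (List Int)) : List (Int × Int) :=
  (PySem.List.pyRange 0 board.length 1).flatMap (fun r =>
    ((PySem.List.pyRange 0 ((board.headD []).length : Int) 1).filter
      (fun c => pvGetCell board r c == some 0)).map (fun c => (r, c)))

-- winning_move: four early-return nested loops, each rendered as .any/.all
def pvWinningMove (board : List (List Int)) (piece : Int) : Bool :=
  let rows : Int := board.length
  let cols : Int := (board.headD []).length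
  ((PySem.List.pyRange 0 rows 1).any fun r =>
    (PySem.List.pyRange 0 (cols - 3 + 1) 1).any fun c =>
      (PySem.List.pyRange 0 3 1).all fun i => pvGetCell board r (c + i) == some piece)
  || ((PySem.List.pyRange 0 cols 1).any fun c =>
    (PySem.List.pyRange 0 (rows - 3 + 1) 1).any fun r =>
      (PySem.List.pyRange 0 3 1).all fun i => pvGetCell board (r + i) c == some piece)
  || ((PySem.List.pyRange 0 (rows - 3 + 1) 1).any fun r =>
    (PySem.List.pyRange 0 (cols - 3 + 1) 1).any fun c =>
      (PySem.List.pyRange 0 3 1).all fun i => pvGetCell board (r + i) (c + i) == some piece)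
  || ((PySem.List.pyRange 0 (rows - 3 + 1) 1).any fun r =>
    (PySem.List.pyRange 2 cols 1).any fun c =>
      (PySem.List.pyRange 0 3 1).all fun i => pvGetCell board (r + i) (c - i) == some piece)

-- the last three statements of both Pythons are literally identical; shared helper
def pvTailMsg (r c rows cols : Int) : String :=
  if (r, c) = (PySem.Int.floordiv rows 2, PySem.Int.floordiv cols 2) then
    "(Ô trung tâm - vị trí tốt nhất)"
  else if [((0 : Int), (0 : Int)), (0, cols - 1), (rows - 1, 0), (rows - 1, cols - 1)].contains (r, c) then
    "(Ô góc - vị trí chiến lược)"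
  else
    "(Nước đi thông minh)"

-- the loops 'for row,col in valid: … if win: if (row,col)==(r,c): return' return only at (r,c),
-- so each is an .any of (win && (row,col)==(r,c))
def get_move_explanation (board : List (List Int)) (move : Int × Int) (piece : Int) : String :=
  let r := move.1
  let c := move.2
  let opp : Int := if piece = 1 then 2 else 1
  let rows : Int := board.length
  let cols : Int := (board.headD []).length
  if (pvValidLocations board).any (fun rc =>
       pvWinningMove (pvSetCell board rc.1 rc.2 piece) piece && (rc == (r, c))) then
    "(Nước đi chiến thắng!)"
  else if (pvValidLocations board).any (fun rc =>
       pvWinningMove (pvSetCell board rc.1 rc.2 opp) opp && (rc == (r, c))) then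
    "(Chặn nước đi nguy hiểm của đối thủ)"
  else
    pvTailMsg r c rows cols

-- ===== PORT B =====

-- _has_line: one generic scan, every cell × every direction vector
def pvHasLine (board : List (List Int)) (piece rows cols : Int) : Bool :=
  (PySem.List.pyRange 0 rows 1).any fun rr =>
    (PySem.List.pyRange 0 cols 1).any fun cc =>
      ([((0 : Int), (1 : Int)), (1, 0), (1, 1), (1, -1)]).any fun d =>
        decide (0 ≤ rr + 2 * d.1 ∧ rr + 2 * d.1 < rows ∧ 0 ≤ cc + 2 * d.2 ∧ cc + 2 * d.2 < cols) &&
        ((PySem.List.pyRange 0 3 1).all fun i => pvGetCell board (rr + i * d.1) (cc + i * d.2) == some piece)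

def get_move_explanation_alt (board : List (List Int)) (move : Int × Int) (piece : Int) : String :=
  let r := move.1
  let c := move.2
  let opp : Int := if piece = 1 then 2 else 1
  let rows : Int := board.length
  let cols : Int := (board.headD []).length
  if decide (0 ≤ r ∧ r < rows ∧ 0 ≤ c ∧ c < cols) && (pvGetCell board r c == some 0) then
    if pvHasLine (pvSetCell board r c piece) piece rows cols then
      "(Nước đi chiến thắng!)"
    else if pvHasLine (pvSetCell board r c opp) opp rows cols then
      "(Chặn nước đi nguy hiểm của đối thủ)"
    else
      pvTailMsg r c rows cols
  else
    pvTailMsg r c rows cols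

-- ===== PRECONDITION & SPEC =====
-- Pre_: exactly the inputs where A returns (board[0] raises on [], and get_valid_locations
-- indexes every row at all columns < len(board[0]), raising IndexError on a shorter row).
def Pre_get_move_explanation (board : List (List Int)) (move : Int × Int) (piece : Int) : Prop :=
  board ≠ [] ∧ ∀ row ∈ board, (board.headD []).length ≤ row.length
instance (board : List (List Int)) (move : Int × Int) (piece : Int) : Decidable (Pre_get_move_explanation board move piece) := by unfold Pre_get_move_explanation; infer_instance

def pvWitness_get_move_explanation : List (List Int) × (Int × Int) × Int := ([[0, 1], [2, 0]], (0, 0), 1)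

def Spec_get_move_explanation (board : List (List Int)) (move : Int × Int) (piece : Int) (out : String) : Prop := out = get_move_explanation_alt board move piece
instance (board : List (List Int)) (move : Int × Int) (piece : Int) (out : String) : Decidable (Spec_get_move_explanation board move piece out) := by unfold Spec_get_move_explanation; infer_instance

-- ===== CLAIM (what is proved, stated in full; the proofs are below) =====
def Claim_equal_get_move_explanation : Prop := ∀ (board : List (List Int)) (move : Int × Int) (piece : Int), Dom_get_move_explanation board move piece → Pre_get_move_explanation board move piece → Spec_get_move_explanation board move piece (get_move_explanation board move piece)

-- ===== LEMMAS AND PROOFS =====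

theorem pv_win_eq (b : List (List Int)) (p : Int) :
    pvWinningMove b p = pvHasLine b p (b.length : Int) ((b.headD []).length : Int) := by
  have h3 : PySem.List.pyRange 0 3 1 = [0, 1, 2] := by decide
  have hR : (0 : Int) ≤ (b.length : Int) := Int.natCast_nonneg _
  have hC : (0 : Int) ≤ ((b.headD []).length : Int) := Int.natCast_nonneg _
  rw [Bool.eq_iff_iff]
  simp only [pvWinningMove, pvHasLine, h3, List.any_eq_true, List.all_cons, List.all_nil,
    Bool.or_eq_true, Bool.and_eq_true, PySem.List.mem_pyRange_one, decide_eq_true_iff,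
    List.any_cons, List.any_nil, beq_iff_eq, and_true, Bool.false_eq_true, or_false]
  norm_num
  constructor
  · rintro ((((⟨r, hr, c, hc, h0, h1, h2⟩ | ⟨c, hc, r, hr, h0, h1, h2⟩) | ⟨r, hr, c, hc, h0, h1, h2⟩) | ⟨r, hr, c, hc, h0, h1, h2⟩))
    · exact ⟨r, ⟨by omega, by omega⟩, c, ⟨by omega, by omega⟩, Or.inl ⟨⟨by omega, by omega, by omega, by omega⟩, h0, h1, h2⟩⟩
    · exact ⟨r, ⟨by omega, by omega⟩, c, ⟨by omega, by omega⟩, Or.inr (Or.inl ⟨⟨by omega, by omega, by omega, by omega⟩, h0, h1, h2⟩)⟩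
    · exact ⟨r, ⟨by omega, by omega⟩, c, ⟨by omega, by omega⟩, Or.inr (Or.inr (Or.inl ⟨⟨by omega, by omega, by omega, by omega⟩, h0, h1, h2⟩))⟩
    · exact ⟨r, ⟨by omega, by omega⟩, c, ⟨by omega, by omega⟩, Or.inr (Or.inr (Or.inr ⟨⟨by omega, by omega, by omega, by omega⟩, h0, (by simpa [sub_eq_add_neg] using h1), (by simpa [sub_eq_add_neg] using h2)⟩))⟩
  · rintro ⟨r, hr, c, hc, (⟨hb, h0, h1, h2⟩ | ⟨hb, h0, h1, h2⟩ | ⟨hb, h0, h1, h2⟩ | ⟨hb, h0, h1, h2⟩)⟩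
    · exact Or.inl (Or.inl (Or.inl ⟨r, ⟨by omega, by omega⟩, c, ⟨by omega, by omega⟩, h0, h1, h2⟩))
    · exact Or.inl (Or.inl (Or.inr ⟨c, ⟨by omega, by omega⟩, r, ⟨by omega, by omega⟩, h0, h1, h2⟩))
    · exact Or.inl (Or.inr ⟨r, ⟨by omega, by omega⟩, c, ⟨by omega, by omega⟩, h0, h1, h2⟩)
    · exact Or.inr ⟨r, ⟨by omega, by omega⟩, c, ⟨by omega, by omega⟩, h0, (by simpa [sub_eq_add_neg] using h1), (by simpa [sub_eq_add_neg] using h2)⟩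

theorem pv_set_length (b : List (List Int)) (r c p : Int) :
    (pvSetCell b r c p).length = b.length := by
  simp [pvSetCell]

theorem pv_set_head_length (b : List (List Int)) (r c p : Int) :
    ((pvSetCell b r c p).headD []).length = (b.headD []).length := by
  cases b with
  | nil => rfl
  | cons hd tl => simp [pvSetCell]; split <;> simp

theorem pv_any_eq_mem {α : Type} [BEq α] [LawfulBEq α] (l : List α) (f : α → Bool) (y : α) :
    l.any (fun x => f x && (x == y)) = (l.contains y && f y) := by
  rw [Bool.eq_iff_iff]
  simp only [List.any_eq_true, Bool.and_eq_true, beq_iff_eq, List.contains_eq_mem, decide_eq_true_iff]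
  constructor
  · rintro ⟨x, hx, hf, rfl⟩; exact ⟨hx, hf⟩
  · rintro ⟨hy, hf⟩; exact ⟨y, hy, hf, rfl⟩

theorem pv_mem_valid (board : List (List Int)) (r c : Int) :
    (pvValidLocations board).contains (r, c) =
      (decide (0 ≤ r ∧ r < (board.length : Int) ∧ 0 ≤ c ∧ c < ((board.headD []).length : Int)) &&
        (pvGetCell board r c == some 0)) := by
  rw [Bool.eq_iff_iff]
  simp only [pvValidLocations, List.contains_eq_mem, List.mem_flatMap, List.mem_map,
    List.mem_filter, PySem.List.mem_pyRange_one, decide_eq_true_iff, Bool.and_eq_true,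
    beq_iff_eq, Prod.mk.injEq]
  constructor
  · rintro ⟨a, ha, a1, ⟨⟨h1, h2⟩, h3⟩, rfl, rfl⟩
    exact ⟨⟨by omega, by omega, by omega, by omega⟩, h3⟩
  · rintro ⟨⟨h1, h2, h3, h4⟩, h5⟩
    exact ⟨r, ⟨h1, h2⟩, c, ⟨⟨h3, h4⟩, h5⟩, rfl, rfl⟩

theorem pv_if_shape (g h1 h2 : Bool) (s1 s2 t : String) :
    (if (g && h1) = true then s1 else if (g && h2) = true then s2 else t) =
    (if g = true then (if h1 = true then s1 else if h2 = true then s2 else t) else t) := by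
  cases g <;> cases h1 <;> cases h2 <;> simp

-- ===== VERDICT (by name: the statement is the Claim_ definition above) =====
theorem get_move_explanation_spec : Claim_equal_get_move_explanation := by
  intro board move piece _ _
  unfold Spec_get_move_explanation
  simp only [get_move_explanation, get_move_explanation_alt]
  rw [pv_any_eq_mem, pv_any_eq_mem, pv_mem_valid, pv_win_eq, pv_win_eq,
    pv_set_length, pv_set_length, pv_set_head_length, pv_set_head_length]
  exact pv_if_shape _ _ _ _ _ _
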